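-- pv_equiv track=rewrite | github.com/amkram/panmap | web_server/app.py | render_genome
-- ===== SOURCE A (Python) =====
-- def render_genome(genome, seeds):
--     # Render genome with seeds aligned
--     rendered = ""
--     seed_positions = {seed: genome.find(seed) for seed in seeds}
--     for i, base in enumerate(genome):
--         if any(pos == i for pos in seed_positions.values()):
--             rendered += f"<span style='color: red;'>{base}</span>"
--         else:
--             rendered += base
--     return rendered
-- ===== SOURCE B (Python) =====
-- def render_genome(genome, seeds):
--     # Walk only the sorted distinct highlight positions, copying untouched slices verbatim.
--     out = ""
--     prev = 0
--     for p in sorted({genome.find(s) for s in seeds}):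
--         if 0 <= p < len(genome):
--             out += genome[prev:p] + "<span style='color: red;'>" + genome[p] + "</span>"
--             prev = p + 1
--     return out + genome[prev:]
-- ===== Notes on version B (the rewrite author's own statement) =====
-- stated objective: faster
-- what changed: Instead of testing every character index against all seed find-positions (and growing the output char by char), B sorts the distinct find positions once and emits the untouched slices between consecutive highlight positions verbatim, advancing a cursor.
import Mathlib
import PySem

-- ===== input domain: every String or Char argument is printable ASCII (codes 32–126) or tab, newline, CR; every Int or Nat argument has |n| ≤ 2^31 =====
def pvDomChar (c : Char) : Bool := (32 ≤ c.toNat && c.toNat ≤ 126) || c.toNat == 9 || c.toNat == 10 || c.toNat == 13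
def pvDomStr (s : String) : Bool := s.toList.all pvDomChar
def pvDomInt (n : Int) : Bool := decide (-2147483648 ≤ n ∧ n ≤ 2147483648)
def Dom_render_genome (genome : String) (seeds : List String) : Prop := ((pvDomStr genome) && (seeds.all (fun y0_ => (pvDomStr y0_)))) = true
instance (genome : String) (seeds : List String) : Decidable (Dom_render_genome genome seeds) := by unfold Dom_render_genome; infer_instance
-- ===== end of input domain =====

-- B walks only the sorted distinct first-occurrence positions, copying the untouched slices
-- between them verbatim, instead of A's per-character scan over all seed positions (objective: faster, measured).

-- the two HTML fragments both Pythons write around a highlighted base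
def pvOpenTag : List Char := "<span style='color: red;'>".toList
def pvCloseTag : List Char := "</span>".toList

-- ===== PORT A =====
def render_genome (genome : String) (seeds : List String) : String :=
  let g := genome.toList
  let seed_positions : PySem.Dict String Int :=
    seeds.foldl (fun d s => d.insert s (PySem.Chars.find g s.toList)) PySem.Dict.empty
  String.ofList ((PySem.List.enumerate g 0).foldl
    (fun r ib =>
      if seed_positions.values.any (fun pos => pos == ib.1)
      then r ++ (pvOpenTag ++ [ib.2] ++ pvCloseTag)
      else r ++ [ib.2]) [])

-- ===== PORT B =====
def render_genome_alt (genome : String) (seeds : List String) : String :=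
  let g := genome.toList
  let n : Int := g.length
  let positions : List Int :=
    PySem.List.sorted (PySem.Set.ofList (seeds.map (fun s => PySem.Chars.find g s.toList)))
      (fun x => x) false
  let st := positions.foldl
    (fun (st : List Char × Int) p =>
      if 0 ≤ p ∧ p < n then
        (st.1 ++ PySem.List.slice g (some st.2) (some p)
              ++ (pvOpenTag ++ [PySem.List.pyGetD g p ' '] ++ pvCloseTag), p + 1)
      else st) ([], 0)
  String.ofList (st.1 ++ PySem.List.slice g (some st.2) none)

-- ===== PRECONDITION & SPEC =====
def Spec_render_genome (genome : String) (seeds : List String) (out : String) : Prop := out = render_genome_alt genome seeds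
instance (genome : String) (seeds : List String) (out : String) : Decidable (Spec_render_genome genome seeds out) := by unfold Spec_render_genome; infer_instance

-- ===== CLAIM (what is proved, stated in full; the proofs are below) =====
def Claim_equal_render_genome : Prop := ∀ (genome : String) (seeds : List String), Dom_render_genome genome seeds → Spec_render_genome genome seeds (render_genome genome seeds)

-- ===== LEMMAS AND PROOFS =====

-- reference form shared by both proofs: render the suffix of g starting at index `prev`,
-- highlighting each index the predicate q accepts
def pvRend (g : List Char) (q : Int → Bool) (prev : Nat) : List Char :=
  (PySem.List.enumerate (g.drop prev) (prev : Int)).flatMap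
    (fun ib => if q ib.1 then pvOpenTag ++ [ib.2] ++ pvCloseTag else [ib.2])

theorem pvFlatMap_congr {α β : Type} (l : List α) (f h : α → List β)
    (he : ∀ x ∈ l, f x = h x) : l.flatMap f = l.flatMap h := by
  induction l with
  | nil => rfl
  | cons a t ih =>
    simp only [List.flatMap_cons]
    rw [he a (by simp), ih (fun x hx => he x (by simp [hx]))]

theorem pvRend_congr (g : List Char) (q q' : Int → Bool) (prev : Nat)
    (h : ∀ i : Int, (prev : Int) ≤ i → i < (g.length : Int) → q i = q' i) :
    pvRend g q prev = pvRend g q' prev := by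
  unfold pvRend
  apply pvFlatMap_congr
  intro x hx
  rcases (PySem.List.mem_enumerate_iff _ _ _).1 hx with ⟨k, hk, rfl⟩
  have hk' : k < g.length - prev := by simpa using hk
  rw [h _ (by simp) (by push_cast; omega)]

theorem pvRend_false (g : List Char) (q : Int → Bool) (prev : Nat)
    (h : ∀ i : Int, (prev : Int) ≤ i → i < (g.length : Int) → q i = false) :
    pvRend g q prev = g.drop prev := by
  unfold pvRend
  rw [pvFlatMap_congr _ _ (fun ib => [ib.2])
      (by
        intro x hx
        rcases (PySem.List.mem_enumerate_iff _ _ _).1 hx with ⟨k, hk, rfl⟩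
        have hk' : k < g.length - prev := by simpa using hk
        have hq := h ((prev : Int) + k) (by simp) (by omega)
        simp [hq])]
  rw [← List.map_eq_flatMap, PySem.List.map_snd_enumerate]

-- getD of the seed-positions dict: the value stored under k is f k whenever k ∈ seeds
theorem pvGetD_seedDict (f : String → Int) (seeds : List String) :
    ∀ (d : PySem.Dict String Int) (k : String),
      (seeds.foldl (fun d s => d.insert s (f s)) d).getD k 0
        = if k ∈ seeds then f k else d.getD k 0 := by
  induction seeds with
  | nil => intro d k; simp
  | cons s rest ih =>
    intro d k
    simp only [List.foldl_cons, ih, PySem.Dict.getD_insert]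
    by_cases hk : k ∈ rest <;> by_cases hks : k = s <;> simp [hk, hks]

-- A's per-character test over the dict's values is: i is the find of some seed
theorem pvCondA (f : String → Int) (seeds : List String) (i : Int) :
    ((seeds.foldl (fun d s => d.insert s (f s)) (PySem.Dict.empty : PySem.Dict String Int)).values.any
        (fun pos => pos == i))
      = decide (∃ s ∈ seeds, f s = i) := by
  set D := seeds.foldl (fun d s => d.insert s (f s)) (PySem.Dict.empty : PySem.Dict String Int) with hD
  have hnd : D.keys.Nodup := by
    rw [hD]
    exact PySem.Dict.nodup_keys_foldl_insert seeds (fun _ s => f s) _ PySem.Dict.nodup_keys_empty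
  have hkeys : D.keys = PySem.Set.ofList seeds := by
    rw [hD, PySem.Dict.keys_foldl_insert]
    rfl
  have hget : ∀ k ∈ seeds, D.getD k 0 = f k := by
    intro k hk
    rw [hD, pvGetD_seedDict, if_pos hk]
  have hvals := PySem.Dict.values_eq_map_keys D hnd 0
  rw [Bool.eq_iff_iff]
  simp only [List.any_eq_true, beq_iff_eq, decide_eq_true_eq, hvals, hkeys, List.mem_map]
  constructor
  · rintro ⟨v, ⟨k, hk, rfl⟩, h⟩
    have hk' := (PySem.Set.mem_ofList _ _).1 hk
    exact ⟨k, hk', by rw [← hget k hk']; exact h⟩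
  · rintro ⟨s, hs, rfl⟩
    exact ⟨f s, ⟨s, (PySem.Set.mem_ofList _ _).2 hs, hget s hs⟩, rfl⟩

-- A's character loop is pvRend with the dict-values predicate
theorem pvPortA (genome : String) (seeds : List String) :
    render_genome genome seeds
      = String.ofList (pvRend genome.toList
          (fun i => decide (∃ s ∈ seeds, PySem.Chars.find genome.toList s.toList = i)) 0) := by
  unfold render_genome
  dsimp only
  congr 1
  have hfun : (fun (r : List Char) (ib : Int × Char) =>
        if ((seeds.foldl (fun d s => d.insert s (PySem.Chars.find genome.toList s.toList)) PySem.Dict.empty).values.any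
              (fun pos => pos == ib.1))
        then r ++ (pvOpenTag ++ [ib.2] ++ pvCloseTag)
        else r ++ [ib.2])
      = (fun (r : List Char) (ib : Int × Char) =>
          r ++ (if decide (∃ s ∈ seeds, PySem.Chars.find genome.toList s.toList = ib.1)
                then pvOpenTag ++ [ib.2] ++ pvCloseTag else [ib.2])) := by
    funext r ib
    rw [pvCondA]
    split <;> rfl
  rw [hfun, PySem.List.foldl_append_eq_flatMap]
  unfold pvRend
  simp

-- splitting the reference rendering at one highlighted position pn
theorem pvRend_split (g : List Char) (q : Int → Bool) (prev pn : Nat)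
    (hprev : prev ≤ pn) (hlt : pn < g.length)
    (hfalse : ∀ i : Int, (prev : Int) ≤ i → i < (pn : Int) → q i = false)
    (htrue : q (pn : Int) = true) :
    pvRend g q prev
      = (g.drop prev).take (pn - prev) ++ (pvOpenTag ++ [g[pn]] ++ pvCloseTag)
        ++ pvRend g q (pn + 1) := by
  have hchunk : ((g.drop prev).take (pn - prev)).length = pn - prev := by
    simp only [List.length_take, List.length_drop]
    omega
  have hsplit : g.drop prev
      = (g.drop prev).take (pn - prev) ++ (g[pn] :: g.drop (pn + 1)) := by
    conv_lhs => rw [← List.take_append_drop (pn - prev) (g.drop prev)]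
    rw [List.drop_drop]
    have h1 : prev + (pn - prev) = pn := by omega
    rw [h1, List.drop_eq_getElem_cons hlt]
  unfold pvRend
  conv_lhs => rw [hsplit]
  rw [PySem.List.enumerate_append]
  have hstart : ((prev : Int) + (((g.drop prev).take (pn - prev)).length : Int)) = (pn : Int) := by
    rw [hchunk]; omega
  rw [hstart, PySem.List.enumerate_cons, List.flatMap_append, List.flatMap_cons]
  have hfirst : (PySem.List.enumerate ((g.drop prev).take (pn - prev)) (prev : Int)).flatMap
      (fun ib => if q ib.1 then pvOpenTag ++ [ib.2] ++ pvCloseTag else [ib.2])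
      = (g.drop prev).take (pn - prev) := by
    rw [pvFlatMap_congr _ _ (fun ib => [ib.2])
        (by
          intro x hx
          rcases (PySem.List.mem_enumerate_iff _ _ _).1 hx with ⟨k, hk, rfl⟩
          rw [hchunk] at hk
          have hq := hfalse ((prev : Int) + k) (by simp) (by omega)
          simp [hq])]
    rw [← List.map_eq_flatMap, PySem.List.map_snd_enumerate]
  rw [hfirst]
  simp only [htrue, if_true]
  have hcast : ((pn : Int) + 1) = (((pn + 1 : Nat)) : Int) := by push_cast; ring
  rw [hcast]
  simp [List.append_assoc]

-- B's position loop satisfies the slice-and-advance invariant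
theorem pvFoldB (g : List Char) :
    ∀ (ps : List Int) (acc : List Char) (prev : Nat),
      ps.Pairwise (· < ·) →
      (∀ p ∈ ps, 0 ≤ p → (prev : Int) ≤ p) →
      prev ≤ g.length →
      (ps.foldl
          (fun (st : List Char × Int) p =>
            if 0 ≤ p ∧ p < (g.length : Int) then
              (st.1 ++ PySem.List.slice g (some st.2) (some p)
                    ++ (pvOpenTag ++ [PySem.List.pyGetD g p ' '] ++ pvCloseTag), p + 1)
            else st) (acc, (prev : Int))).1
        ++ PySem.List.slice g
            (some ((ps.foldl
          (fun (st : List Char × Int) p =>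
            if 0 ≤ p ∧ p < (g.length : Int) then
              (st.1 ++ PySem.List.slice g (some st.2) (some p)
                    ++ (pvOpenTag ++ [PySem.List.pyGetD g p ' '] ++ pvCloseTag), p + 1)
            else st) (acc, (prev : Int))).2)) none
      = acc ++ pvRend g (fun i => decide (i ∈ ps)) prev := by
  intro ps
  induction ps with
  | nil =>
    intro acc prev _ _ hle
    simp only [List.foldl_nil]
    rw [PySem.List.slice_from_natCast, pvRend_false g _ prev (by intro i _ _; simp)]
  | cons p rest ih =>
    intro acc prev hpw hge hle
    have hpw' := (List.pairwise_cons.1 hpw).2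
    have hplt := (List.pairwise_cons.1 hpw).1
    by_cases hin : 0 ≤ p ∧ p < (g.length : Int)
    · -- highlighted position: emit the untouched slice, the span, advance prev
      have hprevp : (prev : Int) ≤ p := hge p (by simp) hin.1
      have hp : p = (p.toNat : Int) := by omega
      set pn := p.toNat with hpn
      have hpnlt : pn < g.length := by omega
      have hprevpn : prev ≤ pn := by omega
      simp only [List.foldl_cons, if_pos hin]
      have hstep := ih (acc ++ PySem.List.slice g (some (prev : Int)) (some p)
              ++ (pvOpenTag ++ [PySem.List.pyGetD g p ' '] ++ pvCloseTag)) (pn + 1)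
          hpw'
          (by intro x hx _; have := hplt x hx; omega)
          (by omega)
      have hcast : p + 1 = (((pn + 1 : Nat)) : Int) := by omega
      rw [hcast, hstep]
      have hslice : PySem.List.slice g (some (prev : Int)) (some p)
          = (g.drop prev).take (pn - prev) := by
        rw [hp, PySem.List.slice_natCast]
      have hgetd : PySem.List.pyGetD g p ' ' = g[pn] := by
        rw [hp, PySem.List.pyGetD_natCast]
        simp [List.getD_eq_getElem?_getD, hpnlt]
      rw [hslice, hgetd]
      have hmain := pvRend_split g (fun i => decide (i ∈ p :: rest)) prev pn hprevpn hpnlt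
          (by
            intro i hi1 hi2
            simp only [decide_eq_false_iff_not, List.mem_cons]
            rintro (rfl | hmem)
            · omega
            · have := hplt i hmem; omega)
          (by simp [hp])
      rw [hmain]
      have htail : pvRend g (fun i => decide (i ∈ p :: rest)) (pn + 1)
          = pvRend g (fun i => decide (i ∈ rest)) (pn + 1) := by
        apply pvRend_congr
        intro i hi _
        have : i ≠ p := by omega
        simp [this]
      rw [htail]
      simp [List.append_assoc]
    · -- skipped position (p < 0 or p ≥ len(g)): no rendered index can equal p
      simp only [List.foldl_cons, if_neg hin]
      rw [ih acc prev hpw' (by intro x hx h0; exact hge x (by simp [hx]) h0) hle]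
      congr 1
      apply pvRend_congr
      intro i hi hilen
      have : i ≠ p := by
        rcases not_and_or.1 hin with h | h
        · have : p < 0 := by omega
          omega
        · have : (g.length : Int) ≤ p := by omega
          omega
      simp [this]

-- B is pvRend with the first-occurrence predicate
theorem pvPortB (genome : String) (seeds : List String) :
    render_genome_alt genome seeds
      = String.ofList (pvRend genome.toList
          (fun i => decide (∃ s ∈ seeds, PySem.Chars.find genome.toList s.toList = i)) 0) := by
  unfold render_genome_alt
  dsimp only
  congr 1
  have hfold := pvFoldB genome.toList
      (PySem.List.sorted (PySem.Set.ofList (seeds.map (fun s => PySem.Chars.find genome.toList s.toList))) (fun x => x) false)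
      [] 0
      (PySem.List.sorted_ofList_pairwise_lt _)
      (by intro p _ h0'; exact h0')
      (by omega)
  simp only [Nat.cast_zero] at hfold
  rw [hfold, List.nil_append]
  apply pvRend_congr
  intro i _ _
  rw [decide_eq_decide]
  rw [PySem.List.mem_sorted, PySem.Set.mem_ofList, List.mem_map]

-- ===== VERDICT (by name: the statement is the Claim_ definition above) =====
theorem render_genome_spec : Claim_equal_render_genome := by
  intro genome seeds _
  unfold Spec_render_genome
  rw [pvPortA, pvPortB]
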